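-- pv_equiv track=rewrite | github.com/Phantom1911/leetcode | GeeksForGeeks/lexi small string len n sum k.py | getSmallestString
-- ===== SOURCE A (Python) =====
-- def getSmallestString(n: int, k: int) -> str:
--     res = ""
--     for i in range(n):
--         res += 'a'
--         k -= 1
--
--     for i in range(n - 1, -1, -1):
--         if k >= 25:
--             res = res[:i] + 'z' + res[i + 1:]
--             k -= 25
--         else:
--             ascii_char = chr(k + 97)
--             res = res[:i] + ascii_char + res[i + 1:]
--             k = 0
--         if k == 0:
--             break
--     return res
-- ===== SOURCE B (Python) =====
-- def getSmallestString(n: int, k: int) -> str: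
--     # closed form: no loop, no repeated slicing.
--     if n <= 0:
--         return ""
--     m = k - n                       # budget left after giving every position value 1 ('a')
--     if m < 25:
--         return 'a' * (n - 1) + chr(m + 97)
--     q, r = divmod(m, 25)            # q positions get bumped all the way to 'z'
--     if q >= n:
--         return 'z' * n              # budget exceeds what n positions can absorb
--     if r == 0:
--         return 'a' * (n - q) + 'z' * q
--     return 'a' * (n - q - 1) + chr(97 + r) + 'z' * q
-- ===== Notes on version B (the rewrite author's own statement) =====
-- stated objective: faster
-- what changed: replaced A's backward loop of repeated full-string slicing with a closed-form divmod computation that builds the answer from at most three string multiplications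
import Mathlib
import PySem

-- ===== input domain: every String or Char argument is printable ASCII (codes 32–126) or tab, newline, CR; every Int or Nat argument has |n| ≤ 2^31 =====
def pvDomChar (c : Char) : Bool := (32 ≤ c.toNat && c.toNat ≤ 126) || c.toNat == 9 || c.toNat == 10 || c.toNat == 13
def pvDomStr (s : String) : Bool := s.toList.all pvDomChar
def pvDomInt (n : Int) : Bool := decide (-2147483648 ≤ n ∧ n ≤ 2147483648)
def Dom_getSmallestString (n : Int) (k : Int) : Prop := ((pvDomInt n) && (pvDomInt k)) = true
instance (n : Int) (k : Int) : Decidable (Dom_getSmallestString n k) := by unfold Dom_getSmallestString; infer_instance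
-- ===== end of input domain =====

-- B replaces A's backward loop of repeated full-string slicing by a closed-form
-- divmod computation built from at most three replications.

-- ===== PORT A =====
-- one iteration of A's second loop; state = (res, k, broken)
def pvStepA (st : List Char × Int × Bool) (i : Int) : List Char × Int × Bool :=
  match st with
  | (res, k, true) => (res, k, true)   -- already broken out of the loop
  | (res, k, false) =>
    if k ≥ 25 then
      let res' := PySem.List.slice res none (some i) ++ ['z'] ++ PySem.List.slice res (some (i + 1)) none
      let k' := k - 25
      (res', k', decide (k' = 0))
    else
      -- chr(k + 97): exact whenever 0 ≤ k + 97 (all inputs admitted by Pre_)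
      let c := Char.ofNat (k + 97).toNat
      let res' := PySem.List.slice res none (some i) ++ [c] ++ PySem.List.slice res (some (i + 1)) none
      (res', (0 : Int), true)

def getSmallestString (n : Int) (k : Int) : String :=
  -- loop 1: res += 'a'; k -= 1, n times
  let p := (PySem.List.pyRange 0 n 1).foldl (fun (p : List Char × Int) _ => (p.1 ++ ['a'], p.2 - 1)) ([], k)
  -- loop 2: for i in range(n-1, -1, -1), with the break modelled by the flag
  let st := (PySem.List.pyRange (n - 1) (-1) (-1)).foldl pvStepA (p.1, p.2, false)
  String.mk st.1

-- ===== PORT B =====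
def getSmallestString_alt (n : Int) (k : Int) : String :=
  if n ≤ 0 then ""
  else if k - n < 25 then
    -- m = k - n fits in the last position alone
    String.mk (List.replicate (n - 1).toNat 'a' ++ [Char.ofNat (k - n + 97).toNat])
  else if PySem.Int.floordiv (k - n) 25 ≥ n then
    -- q >= n: the budget exceeds what n positions can absorb
    String.mk (List.replicate n.toNat 'z')
  else if PySem.Int.mod (k - n) 25 = 0 then
    String.mk (List.replicate (n - PySem.Int.floordiv (k - n) 25).toNat 'a'
      ++ List.replicate (PySem.Int.floordiv (k - n) 25).toNat 'z')
  else
    String.mk (List.replicate (n - PySem.Int.floordiv (k - n) 25 - 1).toNat 'a'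
      ++ Char.ofNat (97 + PySem.Int.mod (k - n) 25).toNat
        :: List.replicate (PySem.Int.floordiv (k - n) 25).toNat 'z')

-- ===== PRECONDITION & SPEC =====
-- Pre_ excludes exactly the inputs on which A (and B alike) raises ValueError:
-- n ≥ 1 with k - n < -97, where chr(k - n + 97) gets a negative code.
def Pre_getSmallestString (n : Int) (k : Int) : Prop :=
  n ≤ 0 ∨ -97 ≤ k - n
instance (n : Int) (k : Int) : Decidable (Pre_getSmallestString n k) := by
  unfold Pre_getSmallestString; infer_instance
def pvWitness_getSmallestString : Int × Int := (3, 30)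

def Spec_getSmallestString (n : Int) (k : Int) (out : String) : Prop := out = getSmallestString_alt n k
instance (n : Int) (k : Int) (out : String) : Decidable (Spec_getSmallestString n k out) := by unfold Spec_getSmallestString; infer_instance

-- ===== CLAIM (what is proved, stated in full; the proofs are below) =====
def Claim_equal_getSmallestString : Prop := ∀ (n : Int) (k : Int), Dom_getSmallestString n k → Pre_getSmallestString n k → Spec_getSmallestString n k (getSmallestString n k)

-- ===== LEMMAS AND PROOFS =====

-- loop-1 lemma: appends 'a' once and decrements k once per element
theorem pv_loop1 (l : List Int) (acc : List Char) (k : Int) :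
    l.foldl (fun (p : List Char × Int) _ => (p.1 ++ ['a'], p.2 - 1)) (acc, k)
      = (acc ++ List.replicate l.length 'a', k - l.length) := by
  induction l generalizing acc k with
  | nil => simp
  | cons x xs ih =>
      simp only [List.foldl_cons, List.length_cons, ih]
      rw [Prod.mk.injEq]
      constructor
      · simp [List.replicate_succ]
      · push_cast
        ring

-- the broken flag absorbs the rest of the fold
theorem pv_broken (l : List Int) (res : List Char) (k : Int) :
    l.foldl pvStepA (res, k, true) = (res, k, true) := by
  induction l with
  | nil => rfl
  | cons x xs ih =>
      simp only [List.foldl_cons, pvStepA]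
      exact ih

theorem pv_take_repl (t j : Nat) (S : List Char) (h : j ≤ t) :
    (List.replicate t 'a' ++ S).take j = List.replicate j 'a' := by
  rw [List.take_append_of_le_length (by simp [h]), List.take_replicate]
  congr 1
  omega

theorem pv_drop_repl (t : Nat) (S : List Char) :
    (List.replicate t 'a' ++ S).drop t = S := by
  rw [List.drop_append_of_le_length (by simp)]
  simp

theorem pv_fdiv (m : Int) : Int.fdiv m 25 = m / 25 := by
  rw [Int.fdiv_eq_ediv]
  simp

theorem pv_fmod (m : Int) : Int.fmod m 25 = m % 25 := by
  rw [Int.fmod_eq_emod]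
  simp

-- one unbroken step of the loop at index t (on a prefix of t+1 'a's): slices evaluated
theorem pv_stepA_eval (t : Nat) (m : Int) (S : List Char) :
    pvStepA (List.replicate (t + 1) 'a' ++ S, m, false) ((t : Int) + 1 - 1)
      = if m ≥ 25
        then (List.replicate t 'a' ++ 'z' :: S, m - 25, decide (m - 25 = 0))
        else (List.replicate t 'a' ++ Char.ofNat (m + 97).toNat :: S, 0, true) := by
  have e1 : PySem.List.slice (List.replicate (t + 1) 'a' ++ S) none (some ((t : Int) + 1 - 1))
      = List.replicate t 'a' := by
    rw [PySem.List.slice_to _ (by omega), show ((t : Int) + 1 - 1).toNat = t by omega,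
        pv_take_repl (t + 1) t S (by omega)]
  have e2 : PySem.List.slice (List.replicate (t + 1) 'a' ++ S) (some ((t : Int) + 1 - 1 + 1)) none
      = S := by
    rw [PySem.List.slice_from _ (by omega), show ((t : Int) + 1 - 1 + 1).toNat = t + 1 by omega,
        pv_drop_repl]
  simp only [pvStepA, e1, e2]
  split_ifs with hm
  · simp
  · simp

-- main loop invariant: folding A's second loop over [t-1, …, 0] starting from
-- t 'a's followed by an already-final suffix S, with remaining budget m,
-- 0 ≤ m ≤ 25·t, yields B's closed form (m.fdiv 25 z's and one middle char).
theorem pv_loopA (t : Nat) (m : Int) (S : List Char) (ht : 1 ≤ t)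
    (h0 : 0 ≤ m) (h1 : m ≤ 25 * t) :
    ((PySem.List.pyRange ((t : Int) - 1) (-1) (-1)).foldl pvStepA
        (List.replicate t 'a' ++ S, m, false)).1
      = if Int.fmod m 25 = 0 ∧ 0 < m
        then List.replicate (t - (Int.fdiv m 25).toNat) 'a'
              ++ List.replicate ((Int.fdiv m 25).toNat) 'z' ++ S
        else List.replicate (t - (Int.fdiv m 25).toNat - 1) 'a'
              ++ Char.ofNat (97 + Int.fmod m 25).toNat
                :: (List.replicate ((Int.fdiv m 25).toNat) 'z' ++ S) := by
  induction t generalizing m S with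
  | zero => omega
  | succ t ih =>
      have hfd := pv_fdiv m
      have hfm := pv_fmod m
      have hcast : ((t + 1 : Nat) : Int) - 1 = (t : Int) + 1 - 1 := by push_cast; ring
      have hcons : PySem.List.pyRange (((t + 1 : Nat) : Int) - 1) (-1) (-1)
          = ((t : Int) + 1 - 1) :: PySem.List.pyRange ((t : Int) + 1 - 1 - 1) (-1) (-1) := by
        rw [hcast]
        exact PySem.List.pyRange_neg_one_cons (by omega)
      rw [hcons, List.foldl_cons, pv_stepA_eval t m S]
      by_cases hm : m ≥ 25
      · rw [if_pos hm]
        by_cases hz : m - 25 = 0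
        · -- k hit 0 exactly: break, everything final
          have hm25 : m = 25 := by omega
          rw [show (decide (m - 25 = 0)) = true by simp [hz], pv_broken]
          rw [if_pos ⟨by rw [hfm]; omega, by omega⟩]
          rw [show (Int.fdiv m 25).toNat = 1 by rw [hfd]; omega]
          rw [show t + 1 - 1 = t by omega, hm25]
          simp [List.replicate_succ]
        · -- continue with t positions, budget m - 25, suffix 'z'::S
          have hfd' := pv_fdiv (m - 25)
          have hfm' := pv_fmod (m - 25)
          rw [show (decide (m - 25 = 0)) = false by simp [hz]]
          have hrw : (t : Int) + 1 - 1 - 1 = (t : Int) - 1 := by ring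
          rw [hrw, ih (m - 25) ('z' :: S) (by omega) (by omega) (by push_cast at h1 ⊢; omega)]
          have hq : (Int.fdiv m 25).toNat = (Int.fdiv (m - 25) 25).toNat + 1 := by
            rw [hfd, hfd']; omega
          have hr : Int.fmod (m - 25) 25 = Int.fmod m 25 := by rw [hfm, hfm']; omega
          rw [hr, hq]
          have hrepl : ∀ (j : Nat), List.replicate j 'z' ++ 'z' :: S
              = List.replicate (j + 1) 'z' ++ S := by
            intro j
            rw [List.replicate_succ']
            simp
          by_cases hcond : Int.fmod m 25 = 0 ∧ 0 < m
          · rw [if_pos ⟨hcond.1, show (0:Int) < m - 25 by omega⟩, if_pos hcond]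
            rw [show t - (Int.fdiv (m - 25) 25).toNat
                  = t + 1 - ((Int.fdiv (m - 25) 25).toNat + 1) by omega]
            rw [List.append_assoc, hrepl, ← List.append_assoc]
          · have hcond' : ¬ (Int.fmod m 25 = 0 ∧ 0 < m - 25) := by
              intro ⟨h1', h2'⟩
              exact hcond ⟨h1', by omega⟩
            rw [if_neg hcond', if_neg hcond]
            rw [show t - (Int.fdiv (m - 25) 25).toNat - 1
                  = t + 1 - ((Int.fdiv (m - 25) 25).toNat + 1) - 1 by omega]
            rw [hrepl]
      · -- middle-character branch: k < 25, place chr(k+97), break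
        rw [if_neg hm, pv_broken]
        have hq0 : Int.fdiv m 25 = 0 := by rw [hfd]; omega
        have hr0 : Int.fmod m 25 = m := by rw [hfm]; omega
        rw [hq0, hr0, if_neg (by omega)]
        simp only [Int.toNat_zero, List.replicate_zero, Nat.sub_zero, List.nil_append]
        rw [show t + 1 - 1 = t by omega, show (97 + m).toNat = (m + 97).toNat by omega]

-- budget still ≥ 25 at every position: the loop writes 'z' everywhere
theorem pv_loopZ (t : Nat) (m : Int) (S : List Char) (h : 25 * t ≤ m) :
    ((PySem.List.pyRange ((t : Int) - 1) (-1) (-1)).foldl pvStepA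
        (List.replicate t 'a' ++ S, m, false)).1 = List.replicate t 'z' ++ S := by
  induction t generalizing m S with
  | zero =>
      rw [show ((0 : Nat) : Int) - 1 = -1 by norm_num,
          PySem.List.pyRange_neg_one_eq_nil (by omega)]
      simp
  | succ t ih =>
      have hm : m ≥ 25 := by push_cast at h; omega
      rw [show ((t + 1 : Nat) : Int) - 1 = (t : Int) + 1 - 1 by push_cast; ring,
          PySem.List.pyRange_neg_one_cons (by omega), List.foldl_cons,
          pv_stepA_eval t m S, if_pos hm]
      by_cases hz : m - 25 = 0
      · rw [show (decide (m - 25 = 0)) = true by simp [hz], pv_broken]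
        have ht0 : t = 0 := by push_cast at h; omega
        subst ht0
        simp
      · rw [show (decide (m - 25 = 0)) = false by simp [hz],
            show (t : Int) + 1 - 1 - 1 = (t : Int) - 1 by ring,
            ih (m - 25) ('z' :: S) (by push_cast at h ⊢; omega)]
        rw [List.replicate_succ']
        simp

theorem getSmallestString_eq_alt (n k : Int) (h : Pre_getSmallestString n k) :
    getSmallestString n k = getSmallestString_alt n k := by
  by_cases hn : n ≤ 0
  · -- both loops of A are empty; B takes its first branch
    unfold getSmallestString getSmallestString_alt
    rw [PySem.List.pyRange_one_eq_nil (by omega),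
        PySem.List.pyRange_neg_one_eq_nil (by omega), if_pos hn]
    rfl
  · have hn1 : 1 ≤ n := by omega
    have hm97 : -97 ≤ k - n := by rcases h with h | h <;> omega
    unfold getSmallestString getSmallestString_alt
    simp only [pv_loop1, List.nil_append, PySem.List.length_pyRange_one, Int.sub_zero]
    set t : Nat := n.toNat with htdef
    have htn : (t : Int) = n := Int.toNat_of_nonneg (by omega)
    have hrange : PySem.List.pyRange (n - 1) (-1) (-1)
        = PySem.List.pyRange ((t : Int) - 1) (-1) (-1) := by rw [htn]
    set m : Int := k - n with hmdef
    rw [hrange, show k - (t : Int) = m by omega, if_neg hn]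
    by_cases hm25 : m < 25
    · -- one iteration of A's loop: the middle character lands at position n-1
      rw [if_pos hm25]
      obtain ⟨t1, ht1⟩ : ∃ t1, t = t1 + 1 := ⟨t - 1, by omega⟩
      rw [ht1, show ((t1 + 1 : Nat) : Int) - 1 = (t1 : Int) + 1 - 1 by push_cast; ring,
          PySem.List.pyRange_neg_one_cons (by omega), List.foldl_cons,
          show List.replicate (t1 + 1) 'a'
            = List.replicate (t1 + 1) 'a' ++ ([] : List Char) by simp,
          pv_stepA_eval t1 m [], if_neg (by omega), pv_broken,
          show (n - 1).toNat = t1 by omega]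
    · have hfd := pv_fdiv m
      have hfm := pv_fmod m
      rw [if_neg hm25]
      simp only [PySem.Int.floordiv, PySem.Int.mod]
      by_cases hq : Int.fdiv m 25 ≥ n
      · -- the loop exhausts all n positions with 'z'
        rw [if_pos hq, show List.replicate t 'a'
              = List.replicate t 'a' ++ ([] : List Char) by simp,
            pv_loopZ t m [] (by omega)]
        simp
      · rw [if_neg hq, show List.replicate t 'a'
              = List.replicate t 'a' ++ ([] : List Char) by simp,
            pv_loopA t m [] (by omega) (by omega) (by omega)]
        have hq0 : 0 ≤ Int.fdiv m 25 := by omega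
        have hqn : Int.fdiv m 25 ≤ n := by omega
        by_cases hr : Int.fmod m 25 = 0
        · rw [if_pos hr, if_pos ⟨hr, by omega⟩, List.append_nil,
              show (n - Int.fdiv m 25).toNat = t - (Int.fdiv m 25).toNat by omega]
        · rw [if_neg hr, if_neg (by tauto)]
          rw [show (n - Int.fdiv m 25 - 1).toNat = t - (Int.fdiv m 25).toNat - 1 by omega]
          simp
-- ===== VERDICT (by name: the statement is the Claim_ definition above) =====
theorem getSmallestString_spec : Claim_equal_getSmallestString := by
  intro n k _ hpre
  unfold Spec_getSmallestString
  exact getSmallestString_eq_alt n k hpre
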